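-- pv_equiv track=rewrite | github.com/JayantSingh2005/Voice-Driving-Assistant | api_service_1.py | strip_wake_word
-- ===== SOURCE A (Python) =====
-- def strip_wake_word(text: str) -> str:
--     """Removes the wake word from the beginning of the input, if present."""
--     WAKE_WORDS = [
--         "hey yuvii", "okay yuvii", "hey yuvi", "hello yuvii", "hello yuvi",
--         "yuvii", "yuvi"
--     ]
--     text_lower = text.lower().strip()
--     for wake in WAKE_WORDS:
--         if text_lower.startswith(wake):
--             return text[len(wake):].lstrip(' ,.!?')
--     return text
-- ===== SOURCE B (Python) =====
-- def strip_wake_word(text: str) -> str: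
--     """Removes the wake word from the beginning of the input, if present."""
--     WAKE_WORDS = [
--         "hey yuvii", "okay yuvii", "hey yuvi", "hello yuvii", "hello yuvi",
--         "yuvii", "yuvi"
--     ]
--     text_lower = text.lower().strip()
--     # Any two wake words that can match simultaneously are prefix-related,
--     # so the list's first match is exactly the LONGEST match.
--     matches = [w for w in WAKE_WORDS if text_lower.startswith(w)]
--     if not matches:
--         return text
--     wake = max(matches, key=len)
--     return text[len(wake):].lstrip(' ,.!?')
-- ===== Notes on version B (the rewrite author's own statement) =====
-- stated objective: alternative
-- what changed: B replaces A's ordered first-match early-return loop by collecting all matching wake words with a filter and selecting the longest one with max(key=len), relying on the fact that simultaneously matching wake words are prefix-related so the longest match equals A's first match.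
import Mathlib
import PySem

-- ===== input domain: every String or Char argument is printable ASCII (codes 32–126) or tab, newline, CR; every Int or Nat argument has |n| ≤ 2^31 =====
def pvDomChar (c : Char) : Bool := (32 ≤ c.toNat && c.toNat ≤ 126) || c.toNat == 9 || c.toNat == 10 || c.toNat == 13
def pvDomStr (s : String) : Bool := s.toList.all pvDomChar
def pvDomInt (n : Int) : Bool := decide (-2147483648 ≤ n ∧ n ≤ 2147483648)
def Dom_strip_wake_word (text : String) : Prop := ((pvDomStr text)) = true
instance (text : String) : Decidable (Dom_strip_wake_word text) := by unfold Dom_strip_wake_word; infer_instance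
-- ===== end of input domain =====

-- B replaces A's ordered first-match loop by filter + longest match (max by len); same value since
-- simultaneously matching wake words are prefix-related. Objective: alternative (no speed claim).

-- ===== PORT A =====
def pvWakeWords : List String :=
  ["hey yuvii", "okay yuvii", "hey yuvi", "hello yuvii", "hello yuvi", "yuvii", "yuvi"]

-- hand port of s.lstrip(' ,.!?'): drop leading chars from that set (exact: lstrip with a chars
-- argument removes exactly the leading characters contained in it)
def pvLstripPunct (s : List Char) : List Char :=
  s.dropWhile (fun c => c == ' ' || c == ',' || c == '.' || c == '!' || c == '?')

def pvLoopA (text : String) (tl : List Char) : List String → String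
  | [] => text
  | w :: ws =>
      if PySem.Chars.startswith tl w.toList then
        String.ofList (pvLstripPunct (PySem.List.slice text.toList (some (w.toList.length : Int)) none))
      else pvLoopA text tl ws

def strip_wake_word (text : String) : String :=
  pvLoopA text (PySem.Chars.strip (PySem.Chars.lower text.toList)) pvWakeWords

-- ===== PORT B =====
def strip_wake_word_alt (text : String) : String :=
  let text_lower := PySem.Chars.strip (PySem.Chars.lower text.toList)
  let hits := pvWakeWords.filter (fun w => PySem.Chars.startswith text_lower w.toList)
  match PySem.List.max? hits (fun w => w.toList.length) with
  | none => text
  | some wake =>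
      String.ofList (pvLstripPunct (PySem.List.slice text.toList (some (wake.toList.length : Int)) none))

-- ===== PRECONDITION & SPEC =====
def Spec_strip_wake_word (text : String) (out : String) : Prop := out = strip_wake_word_alt text
instance (text : String) (out : String) : Decidable (Spec_strip_wake_word text out) := by unfold Spec_strip_wake_word; infer_instance

-- ===== CLAIM (what is proved, stated in full; the proofs are below) =====
def Claim_equal_strip_wake_word : Prop := ∀ (text : String), Dom_strip_wake_word text → Spec_strip_wake_word text (strip_wake_word text)

-- ===== LEMMAS AND PROOFS =====

-- two prefixes of the same list are comparable; incomparable words cannot both match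
theorem pv_startswith_excl (tl p q : List Char)
    (hp : PySem.Chars.startswith tl p = true)
    (h : ¬ (p <+: q) ∧ ¬ (q <+: p)) : PySem.Chars.startswith tl q = false := by
  by_cases hq : PySem.Chars.startswith tl q = true
  · rw [PySem.Chars.startswith_iff] at hp hq
    rcases List.prefix_or_prefix_of_prefix hp hq with h' | h'
    · exact absurd h' h.1
    · exact absurd h' h.2
  · simpa using hq

-- matching a word forces matching each of its prefixes
theorem pv_startswith_mono (tl p q : List Char)
    (hpq : q <+: p) (hp : PySem.Chars.startswith tl p = true) :
    PySem.Chars.startswith tl q = true := by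
  rw [PySem.Chars.startswith_iff] at hp ⊢
  exact hpq.trans hp

-- ===== VERDICT (by name: the statement is the Claim_ definition above) =====
theorem strip_wake_word_spec : Claim_equal_strip_wake_word := by
  intro text _
  unfold Spec_strip_wake_word strip_wake_word strip_wake_word_alt
  set tl := PySem.Chars.strip (PySem.Chars.lower text.toList) with htl
  clear_value tl
  by_cases h1 : PySem.Chars.startswith tl "hey yuvii".toList = true
  · have h3 : PySem.Chars.startswith tl "hey yuvi".toList = true :=
      pv_startswith_mono tl "hey yuvii".toList "hey yuvi".toList (by decide) h1
    have h2 := pv_startswith_excl tl _ "okay yuvii".toList h1 (by decide)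
    have h4 := pv_startswith_excl tl _ "hello yuvii".toList h1 (by decide)
    have h5 := pv_startswith_excl tl _ "hello yuvi".toList h1 (by decide)
    have h6 := pv_startswith_excl tl _ "yuvii".toList h1 (by decide)
    have h7 := pv_startswith_excl tl _ "yuvi".toList h1 (by decide)
    simp at h1 h2 h3 h4 h5 h6 h7; simp [pvWakeWords, pvLoopA, h1, h2, h3, h4, h5, h6, h7, List.filter, PySem.List.max?]; rw [if_neg (by decide)]; norm_num [PySem.List.slice_from]; rfl
  · by_cases h2 : PySem.Chars.startswith tl "okay yuvii".toList = true
    · have h3 := pv_startswith_excl tl _ "hey yuvi".toList h2 (by decide)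
      have h4 := pv_startswith_excl tl _ "hello yuvii".toList h2 (by decide)
      have h5 := pv_startswith_excl tl _ "hello yuvi".toList h2 (by decide)
      have h6 := pv_startswith_excl tl _ "yuvii".toList h2 (by decide)
      have h7 := pv_startswith_excl tl _ "yuvi".toList h2 (by decide)
      simp at h1 h2 h3 h4 h5 h6 h7; simp [pvWakeWords, pvLoopA, h1, h2, h3, h4, h5, h6, h7, List.filter, PySem.List.max?]
    · by_cases h3 : PySem.Chars.startswith tl "hey yuvi".toList = true
      · have h4 := pv_startswith_excl tl _ "hello yuvii".toList h3 (by decide)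
        have h5 := pv_startswith_excl tl _ "hello yuvi".toList h3 (by decide)
        have h6 := pv_startswith_excl tl _ "yuvii".toList h3 (by decide)
        have h7 := pv_startswith_excl tl _ "yuvi".toList h3 (by decide)
        simp at h1 h2 h3 h4 h5 h6 h7; simp [pvWakeWords, pvLoopA, h1, h2, h3, h4, h5, h6, h7, List.filter, PySem.List.max?]
      · by_cases h4 : PySem.Chars.startswith tl "hello yuvii".toList = true
        · have h5 : PySem.Chars.startswith tl "hello yuvi".toList = true :=
            pv_startswith_mono tl "hello yuvii".toList "hello yuvi".toList (by decide) h4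
          have h6 := pv_startswith_excl tl _ "yuvii".toList h4 (by decide)
          have h7 := pv_startswith_excl tl _ "yuvi".toList h4 (by decide)
          simp at h1 h2 h3 h4 h5 h6 h7; simp [pvWakeWords, pvLoopA, h1, h2, h3, h4, h5, h6, h7, List.filter, PySem.List.max?]; rw [if_neg (by decide)]; norm_num [PySem.List.slice_from]; rfl
        · by_cases h5 : PySem.Chars.startswith tl "hello yuvi".toList = true
          · have h6 := pv_startswith_excl tl _ "yuvii".toList h5 (by decide)
            have h7 := pv_startswith_excl tl _ "yuvi".toList h5 (by decide)
            simp at h1 h2 h3 h4 h5 h6 h7; simp [pvWakeWords, pvLoopA, h1, h2, h3, h4, h5, h6, h7, List.filter, PySem.List.max?]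
          · by_cases h6 : PySem.Chars.startswith tl "yuvii".toList = true
            · have h7 : PySem.Chars.startswith tl "yuvi".toList = true :=
                pv_startswith_mono tl "yuvii".toList "yuvi".toList (by decide) h6
              simp at h1 h2 h3 h4 h5 h6 h7; simp [pvWakeWords, pvLoopA, h1, h2, h3, h4, h5, h6, h7, List.filter, PySem.List.max?]; rw [if_neg (by decide)]; norm_num [PySem.List.slice_from]; rfl
            · by_cases h7 : PySem.Chars.startswith tl "yuvi".toList = true
              · simp at h1 h2 h3 h4 h5 h6 h7; simp [pvWakeWords, pvLoopA, h1, h2, h3, h4, h5, h6, h7, List.filter, PySem.List.max?]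
              · simp at h1 h2 h3 h4 h5 h6 h7; simp [pvWakeWords, pvLoopA, h1, h2, h3, h4, h5, h6, h7, List.filter, PySem.List.max?]
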